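-- pv_equiv track=rewrite | github.com/kasperengelen/Project-Databases-2Ba-INF- | client/Controller/TableTransformer.py | __calculate_equifrequent_indices
-- ===== SOURCE A (Python) =====
-- def __calculate_equifrequent_indices(width, remainder, nr_bins):
--     """Calculates the indices of the list that represent bin edges for discretize_using_equal_frequency."""
--     index_bins = [-1] #Offset all the indices because Nth element is at index N-1
--     for i in range(nr_bins):
--         index_value = index_bins[i] + width
--         if remainder > 0:
--             index_value += 1
--             remainder -= 1
--         index_bins.append(index_value)# minus because Nth element is at index N-1
--
--     index_bins[0] = 0 #The first index is always zero.
--     return index_bins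
-- ===== SOURCE B (Python) =====
-- def __calculate_equifrequent_indices(width, remainder, nr_bins):
--     """Closed-form bin edges: edge k is -1 + k*width plus the number of +1 carries among the first k bins."""
--     r0 = max(remainder, 0)
--     return [0] + [-1 + k * width + min(k, r0) for k in range(1, nr_bins + 1)]
-- ===== Notes on version B (the rewrite author's own statement) =====
-- stated objective: simpler
-- what changed: Replaces the loop that mutates a running list and a decreasing remainder with a direct closed form: edge k is -1 + k*width + min(k, max(remainder,0)), built by a single comprehension.
import Mathlib
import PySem

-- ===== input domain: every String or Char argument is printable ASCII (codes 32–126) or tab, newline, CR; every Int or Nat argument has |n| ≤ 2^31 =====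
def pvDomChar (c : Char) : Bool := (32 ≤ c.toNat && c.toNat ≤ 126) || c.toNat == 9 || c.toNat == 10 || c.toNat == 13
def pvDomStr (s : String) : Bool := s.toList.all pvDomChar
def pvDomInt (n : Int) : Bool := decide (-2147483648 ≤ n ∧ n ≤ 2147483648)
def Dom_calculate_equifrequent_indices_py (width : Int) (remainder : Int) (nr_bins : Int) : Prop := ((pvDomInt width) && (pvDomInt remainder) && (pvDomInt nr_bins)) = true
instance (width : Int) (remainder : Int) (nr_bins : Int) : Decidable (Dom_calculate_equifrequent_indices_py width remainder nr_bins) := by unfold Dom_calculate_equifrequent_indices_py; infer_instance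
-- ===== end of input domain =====

-- B replaces A's running accumulator/remainder loop with a closed form per edge (objective: simpler).

-- ===== PORT A =====
-- loop body of A: reads index_bins[i] (always in range, so pyGetD's default 0 is never used),
-- adds width, applies the remainder carry, appends.
def pvStepA (width : Int) (st : List Int × Int) (i : Int) : List Int × Int :=
  let index_value := PySem.List.pyGetD st.1 i 0 + width
  if st.2 > 0 then (st.1 ++ [index_value + 1], st.2 - 1) else (st.1 ++ [index_value], st.2)

def calculate_equifrequent_indices_py (width : Int) (remainder : Int) (nr_bins : Int) : List Int :=
  let s := (PySem.List.pyRange 0 nr_bins 1).foldl (pvStepA width) ([-1], remainder)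
  match s.1 with
  | [] => []            -- unreachable: index_bins starts non-empty
  | _ :: t => 0 :: t    -- index_bins[0] = 0

-- ===== PORT B =====
def calculate_equifrequent_indices_py_alt (width : Int) (remainder : Int) (nr_bins : Int) : List Int :=
  let r0 := max remainder 0
  0 :: (PySem.List.pyRange 1 (nr_bins + 1) 1).map (fun k => -1 + k * width + min k r0)

-- ===== PRECONDITION & SPEC =====
def Spec_calculate_equifrequent_indices_py (width : Int) (remainder : Int) (nr_bins : Int) (out : List Int) : Prop := out = calculate_equifrequent_indices_py_alt width remainder nr_bins
instance (width : Int) (remainder : Int) (nr_bins : Int) (out : List Int) : Decidable (Spec_calculate_equifrequent_indices_py width remainder nr_bins out) := by unfold Spec_calculate_equifrequent_indices_py; infer_instance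

-- ===== CLAIM (what is proved, stated in full; the proofs are below) =====
def Claim_equal_calculate_equifrequent_indices_py : Prop := ∀ (width : Int) (remainder : Int) (nr_bins : Int), Dom_calculate_equifrequent_indices_py width remainder nr_bins → Spec_calculate_equifrequent_indices_py width remainder nr_bins (calculate_equifrequent_indices_py width remainder nr_bins)

-- ===== LEMMAS AND PROOFS =====

-- Loop invariant for A: after n iterations the list holds exactly the closed-form edges
-- f k = -1 + k*width + min k (max remainder 0) for k = 0..n, and the remainder consumed is min n (max remainder 0).
lemma loopA (width remainder : Int) (n : Nat) :
    (PySem.List.pyRange 0 (n : Int) 1).foldl (pvStepA width) ([-1], remainder)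
    = ((PySem.List.pyRange 0 ((n : Int) + 1) 1).map
        (fun k => -1 + k * width + min k (max remainder 0)),
       remainder - min (n : Int) (max remainder 0)) := by
  induction n with
  | zero =>
      rw [Nat.cast_zero, PySem.List.pyRange_one_eq_nil (le_refl 0),
          PySem.List.pyRange_one_singleton]
      simp only [List.foldl_nil, List.map_cons, List.map_nil, Prod.mk.injEq,
        List.cons.injEq, and_true]
      constructor <;> omega
  | succ n ih =>
      have h0 : (0 : Int) ≤ (n : Int) := by positivity
      rw [show ((n + 1 : Nat) : Int) = (n : Int) + 1 by push_cast; ring,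
          PySem.List.pyRange_one_succ_right h0, List.foldl_append, ih]
      rw [PySem.List.pyRange_one_succ_right (by omega : (0 : Int) ≤ (n : Int) + 1)]
      simp only [pvStepA, List.foldl_cons, List.foldl_nil]
      have hget : PySem.List.pyGetD
          ((PySem.List.pyRange 0 ((n : Int) + 1) 1).map
            (fun k => -1 + k * width + min k (max remainder 0))) (n : Int) 0
          = -1 + (n : Int) * width + min (n : Int) (max remainder 0) := by
        have := PySem.List.pyGetD_map_pyRange
          (fun k => -1 + k * width + min k (max remainder 0)) (n + 1) n 0 (by omega)
        rwa [show ((n + 1 : Nat) : Int) = (n : Int) + 1 by push_cast; ring] at this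
      rw [hget]
      split_ifs with h
      · refine Prod.ext ?_ ?_
        · simp only [List.map_append, List.map]
          congr 1
          simp only [List.cons.injEq, and_true]
          rw [add_mul, one_mul]; omega
        · simp only
          omega
      · refine Prod.ext ?_ ?_
        · simp only [List.map_append, List.map]
          congr 1
          simp only [List.cons.injEq, and_true]
          rw [add_mul, one_mul]; omega
        · simp only
          omega

-- ===== VERDICT (by name: the statement is the Claim_ definition above) =====
theorem calculate_equifrequent_indices_py_spec : Claim_equal_calculate_equifrequent_indices_py := by
  intro width remainder nr_bins _
  unfold Spec_calculate_equifrequent_indices_py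
  unfold calculate_equifrequent_indices_py calculate_equifrequent_indices_py_alt
  rcases Decidable.em (nr_bins ≤ 0) with h | h
  · rw [PySem.List.pyRange_one_eq_nil h,
        PySem.List.pyRange_one_eq_nil (by omega : nr_bins + 1 ≤ 1)]
    simp
  · push Not at h
    obtain ⟨n, hn⟩ : ∃ n : Nat, nr_bins = (n : Int) :=
      ⟨nr_bins.toNat, (Int.toNat_of_nonneg h.le).symm⟩
    subst hn
    rw [loopA]
    rw [PySem.List.pyRange_one_cons (by omega : (0 : Int) < (n : Int) + 1)]
    simp
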